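-- pv_equiv track=rewrite | github.com/willckim/doyrix | api-python/utils/table_extract.py | _clean_grid
-- ===== SOURCE A (Python) =====
-- from typing import List, Dict, Any, Optional, Tuple
--
-- def _clean_grid(grid: List[List[str]]) -> List[List[str]]:
--     """Drop all-empty rows/cols; trim cells; normalize row widths."""
--     rows = [[(c or "").strip() for c in r] for r in grid if any((c or "").strip() for c in r)]
--     if not rows:
--         return []
--     max_w = max(len(r) for r in rows)
--     rows = [r + [""] * (max_w - len(r)) for r in rows]
--     keep_idx = []
--     for j in range(max_w):
--         if any(((r[j] if j < len(r) else "") or "").strip() for r in rows):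
--             keep_idx.append(j)
--     return [[(r[j] if j < len(r) else "").strip() for j in keep_idx] for r in rows]
-- ===== SOURCE B (Python) =====
-- def _clean_grid(grid):
--     """Drop all-empty rows/cols; trim cells; normalize row widths."""
--     nonempty = set()
--     rows = []
--     for r in grid:
--         sr = [(c or "").strip() for c in r]
--         if any(sr):
--             rows.append(sr)
--             for j, c in enumerate(sr):
--                 if c:
--                     nonempty.add(j)
--     kept = sorted(nonempty)
--     return [[r[j] if j < len(r) else "" for j in kept] for r in rows]
-- ===== Notes on version B (the rewrite author's own statement) =====
-- stated objective: alternative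
-- what changed: A's four staged passes (filter+strip rows, max width, pad, then a per-column scan over all rows to build keep_idx and a positional rebuild on the padded grid) are replaced by one pass over the grid that simultaneously strips/keeps rows and records every occupied column index in a set, after which the kept columns are just sorted(set) and rows are read off unpadded with a bounds guard.
import Mathlib
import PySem

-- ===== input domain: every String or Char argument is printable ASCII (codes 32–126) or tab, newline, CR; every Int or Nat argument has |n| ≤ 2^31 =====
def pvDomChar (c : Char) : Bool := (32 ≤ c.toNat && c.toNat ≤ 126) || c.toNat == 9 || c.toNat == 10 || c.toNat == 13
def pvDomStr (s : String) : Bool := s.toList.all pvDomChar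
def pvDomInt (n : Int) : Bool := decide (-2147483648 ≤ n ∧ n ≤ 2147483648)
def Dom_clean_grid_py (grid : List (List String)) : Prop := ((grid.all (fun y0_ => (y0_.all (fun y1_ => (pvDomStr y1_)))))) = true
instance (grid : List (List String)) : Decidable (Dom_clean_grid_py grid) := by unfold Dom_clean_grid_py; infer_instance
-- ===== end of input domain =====

-- B replaces A's staged passes (filter, max, pad, per-column scan) by one pass that
-- strips/keeps rows while recording occupied column indices in a set (objective: alternative).

-- ===== PORT A =====
-- '(c or "").strip()' equals '.strip()' on str ('' or "" is "" = c); ported as Str.strip c.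
-- 'r[j] if j < len(r) else ""' is ported exactly as the guarded getD; range(max_w) → List.range.
def clean_grid_py (grid : List (List String)) : List (List String) :=
  let rows := (grid.filter (fun r => r.any (fun c => PySem.Str.strip c != ""))).map
      (fun r => r.map (fun c => PySem.Str.strip c))
  if rows = [] then []
  else
    let max_w := (PySem.List.max? (rows.map (fun r => r.length)) (fun x => x)).getD 0
    let rows2 := rows.map (fun r => r ++ List.replicate (max_w - r.length) "")
    let keep_idx := (List.range max_w).foldl
      (fun acc j =>
        if rows2.any (fun r => PySem.Str.strip (if j < r.length then r.getD j "" else "") != "")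
        then acc ++ [j] else acc) []
    rows2.map (fun r => keep_idx.map (fun j => PySem.Str.strip (if j < r.length then r.getD j "" else "")))

-- ===== PORT B =====
-- Source B's inner 'for j, c in enumerate(sr): if c: nonempty.add(j)' over one stripped row:
def pvMark (s : PySem.Set Int) (sr : List String) : PySem.Set Int :=
  (PySem.List.enumerate sr 0).foldl
    (fun s jc => if jc.2 != "" then PySem.Set.add s jc.1 else s) s

-- Source B's loop body: strip the row; if it has content, append it and mark its occupied columns.
def pvStep (acc : PySem.Set Int × List (List String)) (r : List String) :
    PySem.Set Int × List (List String) :=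
  let sr := r.map (fun c => PySem.Str.strip c)
  if sr.any (fun c => c != "") then (pvMark acc.1 sr, acc.2 ++ [sr]) else acc

-- 'r[j]' sits under the guard 'j < len(r)' with j ≥ 0 (indices come from enumerate),
-- so the guarded pyGetD is exact there.
def clean_grid_py_alt (grid : List (List String)) : List (List String) :=
  let st := grid.foldl pvStep (PySem.Set.empty, [])
  let kept := PySem.List.sorted st.1 (fun x => x) false
  st.2.map (fun r => kept.map (fun j =>
    if j < (r.length : Int) then PySem.List.pyGetD r j "" else ""))

-- ===== PRECONDITION & SPEC =====
def Spec_clean_grid_py (grid : List (List String)) (out : List (List String)) : Prop := out = clean_grid_py_alt grid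
instance (grid : List (List String)) (out : List (List String)) : Decidable (Spec_clean_grid_py grid out) := by unfold Spec_clean_grid_py; infer_instance

-- ===== CLAIM (what is proved, stated in full; the proofs are below) =====
def Claim_equal_clean_grid_py : Prop := ∀ (grid : List (List String)), Dom_clean_grid_py grid → Spec_clean_grid_py grid (clean_grid_py grid)

-- ===== LEMMAS AND PROOFS =====

-- A's row list (filter + strip), shared shape of both reductions.
def pvRows (grid : List (List String)) : List (List String) :=
  (grid.filter (fun r => r.any (fun c => PySem.Str.strip c != ""))).map
    (fun r => r.map (fun c => PySem.Str.strip c))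

-- Python's str.strip is idempotent.
theorem pv_chars_strip_idem (s : List Char) :
    PySem.Chars.strip (PySem.Chars.strip s) = PySem.Chars.strip s := by
  show List.rdropWhile PySem.Chars.isspace (List.dropWhile PySem.Chars.isspace
        (List.rdropWhile PySem.Chars.isspace (List.dropWhile PySem.Chars.isspace s)))
      = List.rdropWhile PySem.Chars.isspace (List.dropWhile PySem.Chars.isspace s)
  set u := List.dropWhile PySem.Chars.isspace s with hu
  have h1 : List.dropWhile PySem.Chars.isspace (List.rdropWhile PySem.Chars.isspace u)
      = List.rdropWhile PySem.Chars.isspace u := by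
    rw [List.dropWhile_eq_self_iff]
    intro hl hp
    have hpre : List.rdropWhile PySem.Chars.isspace u <+: u := List.rdropWhile_prefix _ _
    have hul : 0 < u.length := lt_of_lt_of_le hl hpre.length_le
    have hget : (List.rdropWhile PySem.Chars.isspace u)[0] = u[0] :=
      List.IsPrefix.getElem hpre hl
    rw [hget] at hp
    exact List.dropWhile_get_zero_not PySem.Chars.isspace s hul hp
  rw [h1, List.rdropWhile_idempotent]

theorem pv_strip_idem (s : String) :
    PySem.Str.strip (PySem.Str.strip s) = PySem.Str.strip s := by
  simp [PySem.Str.strip, pv_chars_strip_idem]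

-- Rows of pvRows have strip-fixed cells (also through getD's "" default).
theorem pv_rows_stripped (grid : List (List String)) (r : List String)
    (hr : r ∈ pvRows grid) (j : Nat) :
    PySem.Str.strip (r.getD j "") = r.getD j "" := by
  by_cases hj : j < r.length
  · have hmem : r.getD j "" ∈ r := by
      rw [List.getD_eq_getElem _ "" hj]; exact List.getElem_mem hj
    rcases List.mem_map.mp hr with ⟨r0, _, hr0⟩
    have hmem2 : r.getD j "" ∈ List.map (fun c => PySem.Str.strip c) r0 := hr0 ▸ hmem
    rcases List.mem_map.mp hmem2 with ⟨c0, _, hc0⟩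
    rw [← hc0]
    exact pv_strip_idem c0
  · rw [List.getD_eq_default _ "" (le_of_not_gt hj)]; decide

-- Padding with "" does not change guarded-with-default cell access.
theorem pv_pad_getD (r : List String) (k j : Nat) :
    (r ++ List.replicate k "").getD j "" = r.getD j "" := by
  by_cases hj : j < r.length
  · rw [List.getD_eq_getElem _ "" (by simp; omega), List.getD_eq_getElem _ "" hj,
        List.getElem_append_left hj]
  · rw [List.getD_eq_default _ "" (le_of_not_gt hj)]
    by_cases hj2 : j < r.length + k
    · rw [List.getD_eq_getElem _ "" (by simpa using hj2),
          List.getElem_append_right (le_of_not_gt hj), List.getElem_replicate]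
    · rw [List.getD_eq_default _ "" (by simpa using le_of_not_gt hj2)]

-- The out-of-range guard in A's cell access is redundant: getD already defaults to "".
theorem pv_ite_getD (r : List String) (j : Nat) :
    (if j < r.length then r.getD j "" else "") = r.getD j "" := by
  by_cases hj : j < r.length
  · rw [if_pos hj]
  · rw [if_neg hj, List.getD_eq_default _ _ (le_of_not_gt hj)]

-- A's full cell expression on a padded stripped row is plain unpadded getD.
theorem pv_cell (r : List String)
    (hstr : ∀ j : Nat, PySem.Str.strip (r.getD j "") = r.getD j "") (k j : Nat) :
    PySem.Str.strip (if j < (r ++ List.replicate k "").length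
        then (r ++ List.replicate k "").getD j "" else "")
      = r.getD j "" := by
  rw [pv_ite_getD, pv_pad_getD]
  exact hstr j

theorem pv_any_congr {α : Type} (l : List α) (p q : α → Bool)
    (h : ∀ a ∈ l, p a = q a) : l.any p = l.any q := by
  induction l with
  | nil => rfl
  | cons x t ih =>
      simp only [List.any_cons, h x (List.mem_cons_self), ih (fun a ha => h a (List.mem_cons_of_mem x ha))]

-- === characterising B's single pass ===

theorem pv_mark_mem (l : List String) (i : Int) (s : PySem.Set Int) (x : Int) :
    (x ∈ (PySem.List.enumerate l i).foldl
        (fun s jc => if jc.2 != "" then PySem.Set.add s jc.1 else s) s) ↔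
      x ∈ s ∨ ∃ k : Nat, k < l.length ∧ l.getD k "" ≠ "" ∧ x = i + k := by
  induction l generalizing i s with
  | nil => simp [PySem.List.enumerate_nil]
  | cons h t ih =>
      rw [PySem.List.enumerate_cons, List.foldl_cons, ih]
      have hsplit : (∃ k : Nat, k < (h :: t).length ∧ (h :: t).getD k "" ≠ "" ∧ x = i + k) ↔
          ((h ≠ "" ∧ x = i) ∨ ∃ k : Nat, k < t.length ∧ t.getD k "" ≠ "" ∧ x = (i + 1) + k) := by
        constructor
        · rintro ⟨k, hk, hne, hx⟩
          cases k with
          | zero => exact Or.inl ⟨hne, by simpa using hx⟩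
          | succ k =>
              refine Or.inr ⟨k, by simpa using hk, by simpa using hne, ?_⟩
              rw [hx]; push_cast; ring
        · rintro (⟨hne, hx⟩ | ⟨k, hk, hne, hx⟩)
          · exact ⟨0, by simp, by simpa using hne, by simpa using hx⟩
          · refine ⟨k + 1, by simpa using hk, by simpa using hne, ?_⟩
            rw [hx]; push_cast; ring
      rw [hsplit]
      by_cases hne : h = ""
      · simp [hne]
      · have : (h != "") = true := by simpa using hne
        simp only [this, if_pos]
        rw [PySem.Set.mem_add]
        tauto

theorem pv_mark_nodup (l : List String) (i : Int) (s : PySem.Set Int) (hs : s.Nodup) :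
    ((PySem.List.enumerate l i).foldl
        (fun s jc => if jc.2 != "" then PySem.Set.add s jc.1 else s) s).Nodup := by
  induction l generalizing i s with
  | nil => simpa [PySem.List.enumerate_nil] using hs
  | cons h t ih =>
      rw [PySem.List.enumerate_cons, List.foldl_cons]
      apply ih
      by_cases hne : (h != "") = true
      · simp only [hne, if_pos]; exact PySem.Set.nodup_add s i hs
      · simpa [hne] using hs

-- B's accumulated row list is exactly A's rows (appended to the accumulator).
theorem pv_fold_snd (g : List (List String)) (s : PySem.Set Int) (acc : List (List String)) :
    (g.foldl pvStep (s, acc)).2 = acc ++ pvRows g := by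
  induction g generalizing s acc with
  | nil => simp [pvRows]
  | cons r g ih =>
      rw [List.foldl_cons]
      have hpred : ((r.map (fun c => PySem.Str.strip c)).any (fun c => c != ""))
          = r.any (fun c => PySem.Str.strip c != "") := by
        rw [List.any_map]; rfl
      by_cases hc : r.any (fun c => PySem.Str.strip c != "") = true
      · rw [show pvStep (s, acc) r
              = (pvMark s (r.map (fun c => PySem.Str.strip c)),
                 acc ++ [r.map (fun c => PySem.Str.strip c)]) by
            simp [pvStep, hpred, hc]]
        rw [ih]
        simp [pvRows, hc]
      · rw [show pvStep (s, acc) r = (s, acc) by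
            simp [pvStep, hpred]; simpa using hc]
        rw [ih]
        simp [pvRows, hc]

-- Membership in B's accumulated column set: exactly the occupied (row, column) indices.
theorem pv_fold_fst_mem (g : List (List String)) (s : PySem.Set Int) (acc : List (List String))
    (x : Int) :
    (x ∈ (g.foldl pvStep (s, acc)).1) ↔
      x ∈ s ∨ ∃ r ∈ pvRows g, ∃ k : Nat, k < r.length ∧ r.getD k "" ≠ "" ∧ x = (k : Int) := by
  induction g generalizing s acc with
  | nil => simp [pvRows]
  | cons r g ih =>
      rw [List.foldl_cons]
      have hpred : ((r.map (fun c => PySem.Str.strip c)).any (fun c => c != ""))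
          = r.any (fun c => PySem.Str.strip c != "") := by
        rw [List.any_map]; rfl
      by_cases hc : r.any (fun c => PySem.Str.strip c != "") = true
      · rw [show pvStep (s, acc) r
              = (pvMark s (r.map (fun c => PySem.Str.strip c)),
                 acc ++ [r.map (fun c => PySem.Str.strip c)]) by
            simp [pvStep, hpred, hc]]
        rw [ih]
        unfold pvMark
        rw [pv_mark_mem]
        simp only [pvRows, List.filter_cons, hc, if_pos, List.map_cons, List.mem_cons]
        constructor
        · rintro ((hx | ⟨k, hk, hne, hx⟩) | ⟨r1, hr1, hrest⟩)
          · exact Or.inl hx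
          · exact Or.inr ⟨_, Or.inl rfl, k, hk, hne, by simpa using hx⟩
          · exact Or.inr ⟨r1, Or.inr hr1, hrest⟩
        · rintro (hx | ⟨r1, (hr1 | hr1), hrest⟩)
          · exact Or.inl (Or.inl hx)
          · subst hr1
            rcases hrest with ⟨k, hk, hne, hx⟩
            exact Or.inl (Or.inr ⟨k, hk, hne, by rw [hx]; ring⟩)
          · exact Or.inr ⟨r1, hr1, hrest⟩
      · rw [show pvStep (s, acc) r = (s, acc) by
            simp [pvStep, hpred]; simpa using hc]
        rw [ih]
        simp [pvRows, hc]

theorem pv_fold_fst_nodup (g : List (List String)) (s : PySem.Set Int) (acc : List (List String))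
    (hs : s.Nodup) : ((g.foldl pvStep (s, acc)).1).Nodup := by
  induction g generalizing s acc hs with
  | nil => simpa using hs
  | cons r g ih =>
      rw [List.foldl_cons]
      unfold pvStep
      by_cases hc : ((r.map (fun c => PySem.Str.strip c)).any (fun c => c != "")) = true
      · simp only [hc, if_pos]
        exact ih _ _ (pv_mark_nodup _ _ _ hs)
      · simp only [Bool.not_eq_true] at hc
        simp only [hc, if_neg Bool.false_ne_true]
        exact ih _ _ hs

-- The non-empty case: A's padded rebuild over its keep_idx equals B's rebuild over the
-- sorted occupied-column set, for any stripped row list, width bound and occupancy set.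
theorem pv_else (rows : List (List String)) (W : Nat) (S : List Int)
    (hstr : ∀ r ∈ rows, ∀ j : Nat, PySem.Str.strip (r.getD j "") = r.getD j "")
    (hWmax : ∀ r ∈ rows, r.length ≤ W)
    (hSmem : ∀ x : Int, x ∈ S ↔ ∃ r ∈ rows, ∃ k : Nat, k < r.length ∧ r.getD k "" ≠ "" ∧ x = (k : Int))
    (hSnodup : S.Nodup) :
    (rows.map (fun r => r ++ List.replicate (W - r.length) "")).map
        (fun r => (((List.range W).foldl (fun acc j =>
            if (rows.map (fun r => r ++ List.replicate (W - r.length) "")).any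
                (fun r => PySem.Str.strip (if j < r.length then r.getD j "" else "") != "")
            then acc ++ [j] else acc) []).map
          (fun j => PySem.Str.strip (if j < r.length then r.getD j "" else ""))))
      = rows.map (fun r => (PySem.List.sorted S (fun x => x) false).map
          (fun j => if j < (r.length : Int) then PySem.List.pyGetD r j "" else "")) := by
  -- the keep predicate, strip-free and unpadded
  have hq : ∀ j : Nat,
      ((rows.map (fun r => r ++ List.replicate (W - r.length) "")).any
          (fun r => PySem.Str.strip (if j < r.length then r.getD j "" else "") != ""))
        = rows.any (fun r => r.getD j "" != "") := by
    intro j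
    rw [List.any_map]
    apply pv_any_congr
    intro r hr
    simp only [Function.comp_apply]
    rw [pv_cell r (hstr r hr) (W - r.length) j]
  -- A's keep_idx list is the filtered range
  have hK : (List.range W).foldl (fun acc j =>
        if (rows.map (fun r => r ++ List.replicate (W - r.length) "")).any
            (fun r => PySem.Str.strip (if j < r.length then r.getD j "" else "") != "")
        then acc ++ [j] else acc) []
      = (List.range W).filter (fun j => rows.any (fun r => r.getD j "" != "")) := by
    rw [PySem.List.foldl_append_if_eq_filter, List.nil_append]
    exact List.filter_congr (fun j _ => hq j)
  -- B's sorted set equals A's keep list, cast to Int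
  have hkept : PySem.List.sorted S (fun x => x) false
      = ((List.range W).filter (fun j => rows.any (fun r => r.getD j "" != ""))).map
          (fun j => Int.ofNat j) := by
    apply PySem.List.sorted_eq_of_perm_of_pairwise_lt
    · apply (List.perm_ext_iff_of_nodup ?_ ?_).mpr
      · intro x
        rw [hSmem x]
        simp only [List.mem_map, List.mem_filter, List.mem_range]
        constructor
        · rintro ⟨k, ⟨_, hany⟩, hx⟩
          rw [List.any_eq_true] at hany
          rcases hany with ⟨r, hr, hne⟩
          have hne' : r.getD k "" ≠ "" := by simpa using hne
          have hk : k < r.length := by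
            by_contra hk
            exact hne' (List.getD_eq_default _ "" (le_of_not_gt hk))
          exact ⟨r, hr, k, hk, hne', hx.symm⟩
        · rintro ⟨r, hr, k, hk, hne, hx⟩
          refine ⟨k, ⟨lt_of_lt_of_le hk (hWmax r hr), ?_⟩, hx.symm⟩
          rw [List.any_eq_true]
          exact ⟨r, hr, by simpa using hne⟩
      · exact ((List.nodup_range).filter _).map (fun a b h => by simpa using h)
      · exact hSnodup
    · rw [List.pairwise_map]
      apply List.Pairwise.filter
      exact (List.pairwise_lt_range).imp (fun h => by simpa using h)
  rw [hK, hkept]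
  -- rows rebuilt cell-by-cell agree
  rw [List.map_map]
  apply List.map_congr_left
  intro r hr
  simp only [Function.comp_apply, List.map_map]
  apply List.map_congr_left
  intro j hj
  simp only [Function.comp_apply]
  rw [pv_cell r (hstr r hr) (W - r.length) j]
  by_cases hjr : j < r.length
  · rw [if_pos (show Int.ofNat j < (r.length : Int) by simpa using hjr)]
    simp [Int.ofNat_eq_natCast, PySem.List.pyGetD_natCast]
  · rw [if_neg (show ¬ Int.ofNat j < (r.length : Int) by simpa using hjr),
        List.getD_eq_default _ "" (le_of_not_gt hjr)]

-- the main equation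
theorem pv_main (grid : List (List String)) :
    clean_grid_py grid = clean_grid_py_alt grid := by
  have hrows2 : (grid.foldl pvStep (PySem.Set.empty, [])).2 = pvRows grid := by
    simpa using pv_fold_snd grid PySem.Set.empty []
  by_cases hnil : pvRows grid = []
  · unfold clean_grid_py clean_grid_py_alt
    rw [show ((grid.filter (fun r => r.any (fun c => PySem.Str.strip c != ""))).map
        (fun r => r.map (fun c => PySem.Str.strip c))) = pvRows grid from rfl]
    simp only []
    rw [if_pos hnil, hrows2, hnil]
    simp
  · -- non-empty case
    unfold clean_grid_py clean_grid_py_alt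
    rw [show ((grid.filter (fun r => r.any (fun c => PySem.Str.strip c != ""))).map
        (fun r => r.map (fun c => PySem.Str.strip c))) = pvRows grid from rfl]
    simp only []
    rw [if_neg hnil, hrows2]
    apply pv_else
    · exact fun r hr j => pv_rows_stripped grid r hr j
    · -- every row is at most max_w wide
      intro r hr
      have hne : (pvRows grid).map (fun r => r.length) ≠ [] := by
        simpa [List.map_eq_nil_iff] using hnil
      rcases Option.ne_none_iff_exists'.mp
        ((PySem.List.max?_eq_none_iff (xs := (pvRows grid).map (fun r => r.length))
            (key := fun x => x)).not.mpr hne) with ⟨m, hm⟩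
      rw [hm]
      simpa using PySem.List.max?_isMax hm r.length (List.mem_map.mpr ⟨r, hr, rfl⟩)
    · -- the occupancy set's membership
      intro x
      rw [pv_fold_fst_mem grid PySem.Set.empty [] x]
      simp
    · exact pv_fold_fst_nodup grid PySem.Set.empty [] List.nodup_nil

-- ===== VERDICT (by name: the statement is the Claim_ definition above) =====
theorem clean_grid_py_spec : Claim_equal_clean_grid_py := by
  intro grid _
  show clean_grid_py grid = clean_grid_py_alt grid
  exact pv_main grid
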